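-- pv_equiv track=rewrite | github.com/emorynlp/elit | elit/utils/util.py | infer_space_after
-- ===== SOURCE A (Python) =====
-- from typing import Union, Any, List, Optional, Tuple, Iterable, Dict, Set
--
-- def infer_space_after(sent: List[str]):
--     last_token = None
--     quote_count: int = 0
--     # infer whitespace after field
--     whitespace_after = [True] * len(sent)
--     for token in range(len(sent)):
--         if sent[token] == '"':
--             quote_count += 1
--             if quote_count % 2 != 0:
--                 whitespace_after[token] = False
--             elif last_token is not None:
--                 whitespace_after[last_token] = False
--
--         if last_token is not None:
--
--             if sent[token] in [".", ":", ",", ";", ")", "n't", "!", "?"]: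
--                 whitespace_after[last_token] = False
--
--             if sent[token].startswith("'"):
--                 whitespace_after[last_token] = False
--
--         if sent[token] in ["("]:
--             whitespace_after[token] = False
--
--         last_token = token
--     return whitespace_after
-- ===== SOURCE B (Python) =====
-- def infer_space_after(sent):
--     n = len(sent)
--     # classify each token once: opening[i] / closing[i] say whether sent[i] is an
--     # opening (odd cumulative count) or closing double quote
--     opening = [False] * n
--     cnt = 0
--     for i in range(n):
--         if sent[i] == '"':
--             cnt += 1
--             opening[i] = (cnt % 2 == 1)
--     closing = [sent[i] == '"' and not opening[i] for i in range(n)]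
--     punct = (".", ":", ",", ";", ")", "n't", "!", "?")
--     out = []
--     for i in range(n):
--         ws = True
--         if opening[i] or sent[i] == '(':
--             ws = False
--         if i + 1 < n and (closing[i + 1] or sent[i + 1] in punct
--                           or sent[i + 1].startswith("'")):
--             ws = False
--         out.append(ws)
--     return out
-- ===== Notes on version B (the rewrite author's own statement) =====
-- stated objective: alternative
-- what changed: Replaces A's stateful look-behind pass (quote counter plus patching whitespace_after[last_token]) by precomputed opening/closing-quote classification tables and a single look-ahead pass that decides each flag locally from sent[i] and sent[i+1].
import Mathlib
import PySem

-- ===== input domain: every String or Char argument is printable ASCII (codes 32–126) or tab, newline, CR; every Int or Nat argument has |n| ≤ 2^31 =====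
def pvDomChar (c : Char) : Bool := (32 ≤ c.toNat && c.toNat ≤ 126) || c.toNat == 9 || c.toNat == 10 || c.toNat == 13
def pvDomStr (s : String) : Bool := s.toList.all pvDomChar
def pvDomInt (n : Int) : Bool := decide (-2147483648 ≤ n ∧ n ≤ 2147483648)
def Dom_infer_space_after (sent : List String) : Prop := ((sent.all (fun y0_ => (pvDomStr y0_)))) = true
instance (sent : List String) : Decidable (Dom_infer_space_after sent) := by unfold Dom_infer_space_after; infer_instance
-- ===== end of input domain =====

-- B replaces A's look-behind patching pass by quote-classification tables + a look-ahead pass (alternative decomposition, same cost).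

-- ===== PORT A =====
-- literal transliteration of A: loop over range(len(sent)) carrying (last_token, quote_count, whitespace_after)
def infer_space_after (sent : List String) : List Bool :=
  let step : (Option Nat × Int × List Bool) → Nat → (Option Nat × Int × List Bool) :=
    fun st token =>
      let lastToken := st.1
      let tok := sent.getD token ""   -- sent[token], index always in range
      let (quoteCount, ws) :=
        if tok = "\"" then
          let q := st.2.1 + 1
          if q % 2 ≠ 0 then (q, st.2.2.set token false)
          else match lastToken with
            | some lt => (q, st.2.2.set lt false)
            | none => (q, st.2.2)
        else (st.2.1, st.2.2)
      let ws :=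
        match lastToken with
        | some lt =>
          let ws := if tok ∈ [".", ":", ",", ";", ")", "n't", "!", "?"] then ws.set lt false else ws
          if PySem.Str.startswith tok "'" then ws.set lt false else ws
        | none => ws
      let ws := if tok ∈ ["("] then ws.set token false else ws
      (some token, quoteCount, ws)
  ((List.range sent.length).foldl step (none, 0, List.replicate sent.length true)).2.2

-- ===== PORT B =====
-- transliteration of Source B: build opening[] by one counting pass, derive closing[], then one look-ahead pass
def infer_space_after_alt (sent : List String) : List Bool :=
  let n := sent.length
  let opening := ((List.range n).foldl
    (fun (st : Int × List Bool) i =>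
      if sent.getD i "" = "\"" then (st.1 + 1, st.2.set i ((st.1 + 1) % 2 == 1)) else st)
    (0, List.replicate n false)).2
  let closing := (List.range n).map (fun i => (sent.getD i "" == "\"") && !(opening.getD i false))
  (List.range n).map (fun i =>
    let ws := true
    let ws := if opening.getD i false || sent.getD i "" == "(" then false else ws
    let ws := if decide (i + 1 < n) && (closing.getD (i + 1) false
                || decide ((sent.getD (i + 1) "") ∈ [".", ":", ",", ";", ")", "n't", "!", "?"])
                || PySem.Str.startswith (sent.getD (i + 1) "") "'") then false else ws
    ws)

-- ===== PRECONDITION & SPEC =====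
def Spec_infer_space_after (sent : List String) (out : List Bool) : Prop := out = infer_space_after_alt sent
instance (sent : List String) (out : List Bool) : Decidable (Spec_infer_space_after sent out) := by unfold Spec_infer_space_after; infer_instance

-- ===== CLAIM (what is proved, stated in full; the proofs are below) =====
def Claim_equal_infer_space_after : Prop := ∀ (sent : List String), Dom_infer_space_after sent → Spec_infer_space_after sent (infer_space_after sent)

-- ===== LEMMAS AND PROOFS =====

-- number of '"' tokens among the first k tokens
def pvQN (sent : List String) (k : Nat) : Nat := ((sent.take k).filter (fun t => t = "\"")).length

def pvOpen (sent : List String) (j : Nat) : Bool :=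
  (sent.getD j "" == "\"") && (pvQN sent (j + 1) % 2 == 1)

def pvClose (sent : List String) (j : Nat) : Bool :=
  (sent.getD j "" == "\"") && (pvQN sent (j + 1) % 2 == 0)

def pvSucc (sent : List String) (j : Nat) : Bool :=
  pvClose sent j || decide ((sent.getD j "") ∈ [".", ":", ",", ";", ")", "n't", "!", "?"])
    || PySem.Str.startswith (sent.getD j "") "'"

def pvPartial (sent : List String) (j : Nat) : Bool :=
  !(pvOpen sent j || sent.getD j "" == "(")

def pvFinal (sent : List String) (j : Nat) : Bool :=
  pvPartial sent j && !(pvSucc sent (j + 1))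

theorem pvSet_range_map (n j : Nat) (b : Bool) (f : Nat → Bool) :
    ((List.range n).map f).set j b
      = (List.range n).map (fun i => if i = j then b else f i) := by
  apply List.ext_getElem
  · simp
  · intro i h1 h2
    simp only [List.getElem_set, List.getElem_map, List.getElem_range]
    rcases eq_or_ne i j with h | h
    · simp [h]
    · rw [if_neg (fun hh => h hh.symm), if_neg h]

theorem pvQN_succ (sent : List String) (k : Nat) (hk : k < sent.length) :
    pvQN sent (k + 1) = pvQN sent k + (if sent.getD k "" = "\"" then 1 else 0) := by
  unfold pvQN
  have hg : sent[k]? = some sent[k] := List.getElem?_eq_getElem hk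
  have hd : sent.getD k "" = sent[k] := by
    rw [List.getD_eq_getElem?_getD, hg]; rfl
  rw [List.take_succ, hg, List.filter_append, List.length_append, hd]
  split_ifs with h <;> simp [List.filter, h]

-- invariant for B's opening-table fold
theorem pvParity (a : Nat) : (((a : Int) + 1) % 2 == 1) = ((a + 1) % 2 == 1) := by
  rw [Bool.eq_iff_iff]
  simp only [beq_iff_eq]
  omega

theorem pvOpening_inv (sent : List String) (k : Nat) (hk : k ≤ sent.length) :
    ((List.range k).foldl
      (fun (st : Int × List Bool) i =>
        if sent.getD i "" = "\"" then (st.1 + 1, st.2.set i ((st.1 + 1) % 2 == 1)) else st)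
      (0, List.replicate sent.length false))
    = ((pvQN sent k : Int),
       (List.range sent.length).map (fun j => if j < k then pvOpen sent j else false)) := by
  induction k with
  | zero =>
      simp [pvQN, List.map_const']
  | succ k ih =>
      have hk' : k ≤ sent.length := Nat.le_of_succ_le hk
      have hklt : k < sent.length := Nat.lt_of_succ_le hk
      rw [List.range_succ, List.foldl_append, ih hk', List.foldl_cons, List.foldl_nil]
      have hq := pvQN_succ sent k hklt
      by_cases hquote : sent.getD k "" = "\""
      · rw [if_pos hquote, Prod.mk.injEq]
        refine ⟨by rw [hq, if_pos hquote]; push_cast; ring, ?_⟩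
        rw [pvSet_range_map]
        apply List.map_congr_left
        intro j hj
        simp only [List.mem_range] at hj
        rcases eq_or_ne j k with hjk | hjk
        · subst hjk
          rw [if_pos rfl, if_pos (Nat.lt_succ_self j), pvParity]
          have h1 : pvQN sent (j + 1) = pvQN sent j + 1 := by rw [hq, if_pos hquote]
          simp only [pvOpen, h1, hquote]
          simp
        · rw [if_neg hjk]
          rcases Nat.lt_or_ge j k with hlt | hge
          · rw [if_pos hlt, if_pos (Nat.lt_succ_of_lt hlt)]
          · rw [if_neg (Nat.not_lt.mpr hge), if_neg (by omega)]
      · rw [if_neg hquote, Prod.mk.injEq]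
        refine ⟨by rw [hq, if_neg hquote]; push_cast; ring, ?_⟩
        apply List.map_congr_left
        intro j hj
        simp only [List.mem_range] at hj
        rcases eq_or_ne j k with hjk | hjk
        · subst hjk
          have : pvOpen sent j = false := by
            simp [pvOpen]
            intro h; exact absurd h hquote
          rw [if_neg (Nat.lt_irrefl j), if_pos (Nat.lt_succ_self j), this]
        · rcases Nat.lt_or_ge j k with hlt | hge
          · rw [if_pos hlt, if_pos (Nat.lt_succ_of_lt hlt)]
          · rw [if_neg (Nat.not_lt.mpr hge), if_neg (by omega)]

-- B computes pvFinal (pvPartial at the last position)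
theorem pvAlt_eq (sent : List String) :
    infer_space_after_alt sent
      = (List.range sent.length).map
          (fun j => if j + 1 < sent.length then pvFinal sent j else pvPartial sent j) := by
  unfold infer_space_after_alt
  dsimp only
  rw [pvOpening_inv sent sent.length (le_refl _)]
  dsimp only
  apply List.map_congr_left
  intro j hj
  simp only [List.mem_range] at hj
  have hopen : ∀ i, i < sent.length →
      ((List.range sent.length).map (fun j => if j < sent.length then pvOpen sent j else false)).getD i false
        = pvOpen sent i := by
    intro i hi
    rw [List.getD_eq_getElem?_getD]
    simp [List.getElem?_map, List.getElem?_range, hi]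
  have hclose : ∀ i, i < sent.length →
      ((List.range sent.length).map (fun i =>
          (sent.getD i "" == "\"") &&
          !(((List.range sent.length).map (fun j => if j < sent.length then pvOpen sent j else false)).getD i false))).getD (i) false
        = pvClose sent i := by
    intro i hi
    rw [List.getD_eq_getElem?_getD]
    simp only [List.getElem?_map, List.getElem?_range, hi, if_pos]
    simp only [Option.map_some]
    rw [hopen i hi]
    simp only [pvClose, pvOpen]
    cases hqe : (sent.getD i "" == "\"")
    · simp
    · simp only [Option.getD_some, Bool.true_and, Bool.not_and]
      rw [Bool.eq_iff_iff]
      simp only [Bool.or_eq_true, Bool.not_eq_true', beq_eq_false_iff_ne, beq_iff_eq, ne_eq,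
        Bool.not_true, false_or]
      omega
  by_cases hnext : j + 1 < sent.length
  · rw [hopen j hj, hclose (j + 1) hnext]
    simp only [pvFinal, pvPartial, pvSucc, hnext, decide_true, Bool.true_and, if_pos]
    cases h1 : (pvOpen sent j || sent.getD j "" == "(") <;>
      cases h2 : (pvClose sent (j+1) || decide ((sent.getD (j+1) "") ∈ [".", ":", ",", ";", ")", "n't", "!", "?"]) || PySem.Str.startswith (sent.getD (j+1) "") "'") <;>
      simp [h1, h2]
  · rw [hopen j hj]
    simp only [hnext, decide_false, Bool.false_and, if_neg Bool.false_ne_true, pvPartial]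
    cases h1 : (pvOpen sent j || sent.getD j "" == "(") <;> simp [h1]

-- invariant for A's main loop
theorem pvA_inv (sent : List String) (k : Nat) (hk : k ≤ sent.length) :
    ((List.range k).foldl
      (fun st token =>
        let lastToken := st.1
        let tok := sent.getD token ""
        let (quoteCount, ws) :=
          if tok = "\"" then
            let q := st.2.1 + 1
            if q % 2 ≠ 0 then (q, st.2.2.set token false)
            else match lastToken with
              | some lt => (q, st.2.2.set lt false)
              | none => (q, st.2.2)
          else (st.2.1, st.2.2)
        let ws :=
          match lastToken with
          | some lt =>
            let ws := if tok ∈ [".", ":", ",", ";", ")", "n't", "!", "?"] then ws.set lt false else ws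
            if PySem.Str.startswith tok "'" then ws.set lt false else ws
          | none => ws
        let ws := if tok ∈ ["("] then ws.set token false else ws
        ((some token : Option Nat), quoteCount, ws))
      ((none : Option Nat), (0 : Int), List.replicate sent.length true))
    = ((if k = 0 then none else some (k - 1)),
       (pvQN sent k : Int),
       (List.range sent.length).map (fun j =>
         if j + 1 < k then pvFinal sent j
         else if j + 1 = k then pvPartial sent j else true)) := by
  induction k with
  | zero =>
      simp [pvQN, List.map_const']
  | succ k ih =>
      have hk' : k ≤ sent.length := Nat.le_of_succ_le hk
      have hklt : k < sent.length := Nat.lt_of_succ_le hk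
      rw [List.range_succ, List.foldl_append, ih hk', List.foldl_cons, List.foldl_nil]
      dsimp only
      have hq := pvQN_succ sent k hklt
      by_cases hk0 : k = 0
      · subst hk0
        rw [show (if 0 = 0 then (none : Option Nat) else some (0 - 1)) = none by simp]
        dsimp only
        have h0 : (pvQN sent 0 : Int) = 0 := by simp [pvQN]
        have h1 : ((0 : Int) + 1) % 2 ≠ 0 := by decide
        rw [h0, if_pos h1]
        simp only [List.getD_eq_getElem?_getD] at hq ⊢
        by_cases hquote : sent[0]?.getD "" = "\"" <;> by_cases hparen : sent[0]?.getD "" ∈ ["("] <;>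
          simp only [hquote, hparen, if_true, if_false, reduceIte, Prod.mk.injEq]
        · rw [hquote] at hparen; simp at hparen
        · refine ⟨by simp, by rw [hq, if_pos hquote]; simp [pvQN], ?_⟩
          simp only [show ("\"" ∈ ["("]) = False by simp, if_false]
          rw [pvSet_range_map, List.map_inj_left]
          intro j hj
          by_cases hj0 : j = 0
          · subst hj0
            have h2 : pvQN sent 1 = 1 := by rw [hq, if_pos hquote]; simp [pvQN]
            simp [pvPartial, pvOpen, hquote, h2]
          · simp [hj0]
        · refine ⟨by simp, by rw [hq, if_neg hquote]; simp [pvQN], ?_⟩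
          simp only [List.mem_singleton] at hparen
          rw [pvSet_range_map, List.map_inj_left]
          intro j hj
          by_cases hj0 : j = 0
          · subst hj0
            simp [pvPartial, pvOpen, hquote, hparen]
          · simp [hj0]
        · refine ⟨by simp, by rw [hq, if_neg hquote]; simp [pvQN], ?_⟩
          simp only [List.mem_singleton] at hparen
          rw [List.map_inj_left]
          intro j hj
          by_cases hj0 : j = 0
          · subst hj0
            simp [pvPartial, pvOpen, hquote, hparen]
          · simp [hj0]
      · rw [if_neg hk0]
        dsimp only
        clear ih
        have hkpos : 0 < k := Nat.pos_of_ne_zero hk0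
        have hkm : k - 1 + 1 = k := by omega
        have hne : ¬ k = k - 1 := by omega
        simp only [List.getD_eq_getElem?_getD] at hq ⊢
        by_cases hquote : sent[k]?.getD "" = "\""
        · have hqq : pvQN sent (k + 1) = pvQN sent k + 1 := by rw [hq, if_pos hquote]
          have hp : ¬ sent[k]?.getD "" ∈ [".", ":", ",", ";", ")", "n't", "!", "?"] := by
            rw [hquote]; simp
          have hs : ¬ PySem.Str.startswith (sent[k]?.getD "") "'" = true := by
            rw [hquote]; decide
          have hpar : ¬ sent[k]?.getD "" ∈ ["("] := by rw [hquote]; simp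
          by_cases hodd : ((pvQN sent k : Int) + 1) % 2 ≠ 0
          · have hoddN : pvQN sent (k + 1) % 2 = 1 := by omega
            rw [if_pos hquote, if_pos hodd, if_neg hp, if_neg hs, if_neg hpar]
            dsimp only
            simp only [Prod.mk.injEq]
            refine ⟨by simp, by rw [hqq]; push_cast; ring, ?_⟩
            rw [pvSet_range_map, List.map_inj_left]
            intro j hj
            by_cases hjk : j = k
            · subst hjk
              simp [pvPartial, pvOpen, hquote, hoddN]
            · by_cases hjk1 : j = k - 1
              · subst hjk1
                simp [hjk, hkm, pvFinal, pvSucc, pvClose, pvPartial, hquote, hoddN,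
                  show PySem.Chars.startswith ['\"'] ['\''] = false by decide]
              · split_ifs <;> first | rfl | (exfalso; omega)
          · have hevenN : pvQN sent (k + 1) % 2 = 0 := by omega
            rw [if_pos hquote, if_neg hodd, if_neg hp, if_neg hs, if_neg hpar]
            dsimp only
            simp only [Prod.mk.injEq]
            refine ⟨by simp, by rw [hqq]; push_cast; ring, ?_⟩
            rw [pvSet_range_map, List.map_inj_left]
            intro j hj
            by_cases hjk : j = k
            · have ho : pvOpen sent k = false := by simp [pvOpen, hquote, hevenN]
              subst hjk
              simp [pvPartial, ho, hquote, hne]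
            · by_cases hjk1 : j = k - 1
              · subst hjk1
                simp [hjk, hkm, pvFinal, pvSucc, pvClose, pvPartial, hquote, hevenN]
              · split_ifs <;> first | rfl | (exfalso; omega)
        · have hqq : pvQN sent (k + 1) = pvQN sent k := by simp [hq, hquote]
          have hopenk : pvOpen sent k = false := by simp [pvOpen, hquote]
          have hclosek : pvClose sent k = false := by simp [pvClose, hquote]
          rw [if_neg hquote]
          dsimp only
          by_cases hpunct : sent[k]?.getD "" ∈ [".", ":", ",", ";", ")", "n't", "!", "?"] <;>
          by_cases hsw : PySem.Str.startswith (sent[k]?.getD "") "'" = true <;>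
          by_cases hparen : sent[k]?.getD "" ∈ ["("] <;>
            [rw [if_pos hpunct, if_pos hsw, if_pos hparen];
             rw [if_pos hpunct, if_pos hsw, if_neg hparen];
             rw [if_pos hpunct, if_neg hsw, if_pos hparen];
             rw [if_pos hpunct, if_neg hsw, if_neg hparen];
             rw [if_neg hpunct, if_pos hsw, if_pos hparen];
             rw [if_neg hpunct, if_pos hsw, if_neg hparen];
             rw [if_neg hpunct, if_neg hsw, if_pos hparen];
             rw [if_neg hpunct, if_neg hsw, if_neg hparen]]
          all_goals simp only [List.mem_singleton] at hparen
          all_goals simp at hsw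
          all_goals (
            simp only [Prod.mk.injEq]
            refine ⟨by simp, by rw [hqq], ?_⟩
            try simp only [pvSet_range_map]
            rw [List.map_inj_left]
            intro j hj
            by_cases hjk : j = k
            · subst hjk
              simp [pvPartial, hopenk, hparen, hne]
            · by_cases hjk1 : j = k - 1
              · subst hjk1
                simp [hjk, hkm, pvFinal, pvSucc, pvPartial, hclosek, hpunct, hsw]
              · split_ifs <;> first | rfl | (exfalso; omega))

theorem pvA_eq (sent : List String) :
    infer_space_after sent
      = (List.range sent.length).map
          (fun j => if j + 1 < sent.length then pvFinal sent j else pvPartial sent j) := by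
  unfold infer_space_after
  dsimp only
  rw [pvA_inv sent sent.length (le_refl _)]
  dsimp only
  apply List.map_congr_left
  intro j hj
  simp only [List.mem_range] at hj
  by_cases h : j + 1 < sent.length
  · simp [h]
  · have : j + 1 = sent.length := by omega
    simp [h, this]

-- ===== VERDICT (by name: the statement is the Claim_ definition above) =====
theorem infer_space_after_spec : Claim_equal_infer_space_after := by
  intro sent _
  unfold Spec_infer_space_after
  rw [pvA_eq, pvAlt_eq]
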